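-- pv_equiv track=rewrite | github.com/TomNij/AdventofCode | Advent_Code_2020/Day6/customs_forms.py | match_ans
-- ===== SOURCE A (Python) =====
-- def match_ans(list):
--     match = 0
--     n_ans = len(list)
--     ans_line = ''.join(list)
--     for char in set(ans_line):
--         if ans_line.count(char) == n_ans:
--             match += 1
--     return match
-- ===== SOURCE B (Python) =====
-- def match_ans(list):
--     n_ans = len(list)
--     chars = sorted(''.join(list))
--     m = len(chars)
--     match = 0
--     i = 0
--     while i < m:
--         j = i + 1
--         while j < m and chars[j] == chars[i]:
--             j += 1
--         if j - i == n_ans: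
--             match += 1
--         i = j
--     return match
-- ===== Notes on version B (the rewrite author's own statement) =====
-- stated objective: alternative
-- what changed: Instead of building set(joined) and rescanning the joined string with str.count for each distinct character, B sorts the joined characters and makes one linear scan over the sorted list counting maximal runs whose length equals len(list); grouping-by-sorting replaces hashing plus repeated counting scans.
import Mathlib
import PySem

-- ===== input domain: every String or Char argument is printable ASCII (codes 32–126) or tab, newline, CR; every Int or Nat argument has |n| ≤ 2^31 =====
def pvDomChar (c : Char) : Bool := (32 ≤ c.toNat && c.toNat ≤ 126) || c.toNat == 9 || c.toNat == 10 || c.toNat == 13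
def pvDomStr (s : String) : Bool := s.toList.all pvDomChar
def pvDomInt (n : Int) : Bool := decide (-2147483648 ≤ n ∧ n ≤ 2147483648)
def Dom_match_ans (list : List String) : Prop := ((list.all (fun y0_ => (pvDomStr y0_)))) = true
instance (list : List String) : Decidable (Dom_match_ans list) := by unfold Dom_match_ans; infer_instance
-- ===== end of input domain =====

-- B sorts the joined characters and counts maximal runs of length len(list) in one scan, instead of A's set(joined) plus a str.count scan per distinct char (alternative algorithm).


-- ===== PORT A =====
-- for char in set(ans_line): the loop body only increments a counter on a per-char test,
-- so the result is independent of Python's set iteration order.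
def match_ans (list : List String) : Int :=
  let n_ans : Int := (list.length : Int)
  let ansLine : String := PySem.Str.join "" list
  (PySem.Set.ofList ansLine.toList).foldl
    (fun m c => if ((PySem.Str.count ansLine (String.ofList [c]) : Nat) : Int) = n_ans then m + 1 else m) 0

-- ===== PORT B =====
-- the outer while loop of Source B: each step consumes one maximal run (the inner
-- 'while chars[j] == chars[i]' is the takeWhile) and bumps match when its length is n_ans
def runScan (n_ans : Int) (chars : List Char) (match_ : Int) : Int :=
  match chars with
  | [] => match_
  | c :: t =>
      runScan n_ans (t.dropWhile (fun x => x == c))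
        (if (((1 + (t.takeWhile (fun x => x == c)).length : Nat) : Int) = n_ans) then match_ + 1 else match_)
termination_by chars.length
decreasing_by
  simp only [List.length_cons]
  exact Nat.lt_succ_of_le (List.length_dropWhile_le _ _)

def match_ans_alt (list : List String) : Int :=
  let n_ans : Int := (list.length : Int)
  let chars : List Char := PySem.List.sorted (PySem.Str.join "" list).toList (fun x => x) false
  runScan n_ans chars 0

-- ===== PRECONDITION & SPEC =====
def Spec_match_ans (list : List String) (out : Int) : Prop := out = match_ans_alt list
instance (list : List String) (out : Int) : Decidable (Spec_match_ans list out) := by unfold Spec_match_ans; infer_instance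

-- ===== CLAIM (what is proved, stated in full; the proofs are below) =====
def Claim_equal_match_ans : Prop := ∀ (list : List String), Dom_match_ans list → Spec_match_ans list (match_ans list)

-- ===== LEMMAS AND PROOFS =====

-- str.count of a single-character needle counts the occurrences of that character
lemma chars_count_go_singleton (c : Char) :
    ∀ (fuel : Nat) (l : List Char) (acc : Nat), l.length ≤ fuel →
      PySem.Chars.count.go [c] fuel l acc = acc + l.count c := by
  intro fuel
  induction fuel with
  | zero =>
    intro l acc h
    cases l with
    | nil => simp [PySem.Chars.count.go]
    | cons a t => simp at h
  | succ n ih =>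
    intro l acc h
    cases l with
    | nil => simp [PySem.Chars.count.go]
    | cons a t =>
      by_cases hc : a = c
      · subst hc
        have hpre : [a].isPrefixOf (a :: t) = true := by simp [List.isPrefixOf]
        simp only [PySem.Chars.count.go, hpre, if_true, List.length_singleton, List.drop_one,
          List.tail_cons]
        rw [ih t (acc + 1) (by simpa using Nat.le_of_succ_le_succ h)]
        simp
        omega
      · have hpre : [c].isPrefixOf (a :: t) = false := by
          simp [List.isPrefixOf]
          exact fun hac => hc hac.symm
        simp only [PySem.Chars.count.go, hpre, if_neg, Bool.false_eq_true, not_false_iff]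
        rw [ih t acc (by simpa using Nat.le_of_succ_le_succ h)]
        simp [hc]

lemma chars_count_singleton (s : List Char) (c : Char) :
    PySem.Chars.count s [c] = s.count c := by
  unfold PySem.Chars.count
  simp only [List.isEmpty_cons, if_false, Bool.false_eq_true]
  simpa using chars_count_go_singleton c s.length s 0 le_rfl

-- folding Set.add over elements already present leaves the accumulator unchanged
lemma foldl_add_of_all_eq (c : Char) :
    ∀ (r : List Char), (∀ x ∈ r, x = c) →
      List.foldl PySem.Set.add [c] r = [c] := by
  intro r
  induction r with
  | nil => intro _; rfl
  | cons a t ih =>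
    intro h
    have ha : a = c := h a (by simp)
    subst ha
    simp only [List.foldl_cons]
    have : PySem.Set.add [a] a = [a] := by
      simp [PySem.Set.add, PySem.Set.contains]
    rw [this]
    exact ih (fun x hx => h x (by simp [hx]))

-- a head element absent from the rest stays in front of the set being built
lemma foldl_add_cons_of_not_mem (c : Char) :
    ∀ (l s : List Char), c ∉ l →
      List.foldl PySem.Set.add (c :: s) l = c :: List.foldl PySem.Set.add s l := by
  intro l
  induction l with
  | nil => intro s _; rfl
  | cons a t ih =>
    intro s hc
    have hac : a ≠ c := fun h => hc (by simp [h])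
    simp only [List.foldl_cons]
    have : PySem.Set.add (c :: s) a = c :: PySem.Set.add s a := by
      simp [PySem.Set.add, PySem.Set.contains, hac]
      split_ifs with h
      · rfl
      · rfl
    rw [this]
    exact ih (PySem.Set.add s a) (fun h => hc (by simp [h]))

-- the distinct elements of a sorted run-decomposed list: head, then the distinct elements of the tail after the run
lemma ofList_run (c : Char) (r t : List Char) (hr : ∀ x ∈ r, x = c) (ht : c ∉ t) :
    PySem.Set.ofList (c :: r ++ t) = c :: PySem.Set.ofList t := by
  rw [PySem.Set.ofList_eq_foldl, PySem.Set.ofList_eq_foldl]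
  simp only [List.foldl_cons, List.foldl_append]
  have h1 : PySem.Set.add [] c = [c] := by simp [PySem.Set.add, PySem.Set.contains]
  rw [h1, foldl_add_of_all_eq c r hr]
  exact foldl_add_cons_of_not_mem c t [] ht

-- the run scan over a sorted list counts the distinct chars whose multiplicity is n
lemma runScan_sorted (n : Int) :
    ∀ (t : List Char), t.Pairwise (· ≤ ·) → ∀ acc : Int,
      runScan n t acc
        = acc + ((PySem.Set.ofList t).countP
            (fun c => decide (((t.count c : Nat) : Int) = n)) : Int) := by
  have main : ∀ (k : Nat) (t : List Char), t.length ≤ k → t.Pairwise (· ≤ ·) → ∀ acc : Int,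
      runScan n t acc
        = acc + ((PySem.Set.ofList t).countP
            (fun c => decide (((t.count c : Nat) : Int) = n)) : Int) := by
    intro k
    induction k with
    | zero =>
      intro t hlen _ acc
      have : t = [] := List.eq_nil_of_length_eq_zero (Nat.le_zero.mp hlen)
      subst this
      simp [runScan, PySem.Set.ofList]
    | succ k ih =>
      intro t hlenk
      match t with
    | [] => intro _ acc; simp [runScan, PySem.Set.ofList]
    | c :: rest =>
      intro hp acc
      have hr : ∀ x ∈ rest.takeWhile (fun x => x == c), x = c := by
        intro x hx
        have := List.mem_takeWhile_imp hx
        simpa using this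
      set run := rest.takeWhile (fun x => x == c) with hrun
      set t' := rest.dropWhile (fun x => x == c) with ht'
      have hsplit : rest = run ++ t' := (List.takeWhile_append_dropWhile).symm
      have hrest_le : ∀ x ∈ rest, c ≤ x := by
        intro x hx
        exact (List.pairwise_cons.mp hp).1 x hx
      have ht'p : t'.Pairwise (· ≤ ·) := by
        have : rest.Pairwise (· ≤ ·) := (List.pairwise_cons.mp hp).2
        exact this.sublist (List.dropWhile_sublist _)
      have hcnot : c ∉ t' := by
        intro hc
        cases h : t' with
        | nil => rw [h] at hc; simp at hc
        | cons d u =>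
          have hd : ¬ (d == c) = true := by
            have := List.head?_dropWhile_not (fun x => x == c) rest
            rw [← ht', h] at this
            simpa using this
          have hdc : d ≠ c := by simpa using hd
          rw [h] at hc
          rcases List.mem_cons.mp hc with h1 | h1
          · exact hdc h1.symm
          · -- c ∈ u, but d ≤ c and c ≤ d gives d = c
            have hdu : ∀ x ∈ u, d ≤ x := by
              have := ht'p
              rw [h] at this
              exact (List.pairwise_cons.mp this).1
            have hdlec : d ≤ c := hdu c h1
            have hcled : c ≤ d := by
              apply hrest_le
              rw [hsplit, h]
              simp
            exact hdc (le_antisymm hdlec hcled)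
      have hcount_c : ((c :: rest).count c : Nat) = 1 + run.length := by
        rw [hsplit]
        have h1 : run.count c = run.length := by
          rw [List.count_eq_length]
          intro x hx; exact ((hr x hx) ▸ rfl : c = x).symm ▸ rfl
        have h2 : t'.count c = 0 := List.count_eq_zero.mpr hcnot
        simp [List.count_append, h1, h2]
        omega
      have hcount_ne : ∀ d : Char, d ≠ c → (c :: rest).count d = t'.count d := by
        intro d hd
        rw [hsplit]
        have h1 : run.count d = 0 := by
          rw [List.count_eq_zero]
          intro hmem; exact hd (hr d hmem)
        simp [List.count_append, h1, Ne.symm hd]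
      have hof : PySem.Set.ofList (c :: rest) = c :: PySem.Set.ofList t' := by
        rw [hsplit]; exact ofList_run c run t' hr hcnot
      rw [runScan]
      have hlen : t'.length ≤ k := by
        have h1 : t'.length ≤ rest.length := List.length_dropWhile_le _ _
        have h2 : rest.length + 1 ≤ k + 1 := by simpa using hlenk
        omega
      rw [ih t' hlen ht'p]
      rw [hof]
      simp only [List.countP_cons]
      have hpred' : (PySem.Set.ofList t').countP
            (fun d => decide ((((c :: rest).count d : Nat) : Int) = n))
          = (PySem.Set.ofList t').countP
            (fun d => decide (((t'.count d : Nat) : Int) = n)) := by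
        apply List.countP_congr
        intro d hd
        have hdt' : d ∈ t' := (PySem.Set.mem_ofList _ _).mp hd
        have hdc : d ≠ c := fun h => hcnot (h ▸ hdt')
        rw [hcount_ne d hdc]
      rw [hpred', hcount_c]
      simp only [← hrun]
      push_cast
      by_cases hn : (1 + (run.length : Int)) = n
      · simp [hn]; ring
      · simp [hn]
  intro t hp acc
  exact main t.length t le_rfl hp acc

-- ===== VERDICT (by name: the statement is the Claim_ definition above) =====
theorem match_ans_spec : Claim_equal_match_ans := by
  intro list _
  unfold Spec_match_ans match_ans match_ans_alt
  simp only []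
  set s : List Char := (PySem.Str.join "" list).toList with hs
  set t : List Char := PySem.List.sorted s (fun x => x) false with htdef
  have hperm : t.Perm s := PySem.List.sorted_perm s (fun x => x) false
  have hpair : t.Pairwise (· ≤ ·) := by
    simpa using PySem.List.sorted_pairwise s (fun x => x)
  -- B side via the run-scan characterisation
  rw [runScan_sorted (list.length : Int) t hpair 0]
  -- A side is a countP over the distinct chars
  have hcnt : ∀ c : Char,
      ((PySem.Str.count (PySem.Str.join "" list) (String.ofList [c]) : Nat) : Int)
        = ((s.count c : Nat) : Int) := by
    intro c
    rw [PySem.Str.count_eq]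
    simp [chars_count_singleton, hs]
  have hfun : (fun (m : Int) (c : Char) =>
        if ((PySem.Str.count (PySem.Str.join "" list) (String.ofList [c]) : Nat) : Int)
            = (list.length : Int) then m + 1 else m)
      = (fun (m : Int) (c : Char) =>
        if ((s.count c : Nat) : Int) = (list.length : Int) then m + 1 else m) := by
    funext m c
    rw [hcnt c]
  rw [hfun]
  have hAside := PySem.List.foldl_if_add_one
    (fun c : Char => decide (((s.count c : Nat) : Int) = (list.length : Int)))
    (PySem.Set.ofList s) 0
  simp only [decide_eq_true_eq] at hAside
  rw [hAside]
  -- the two countP's agree: Set.ofList t ~ Set.ofList s and counts are perm-invariant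
  have hsetperm : (PySem.Set.ofList t).Perm (PySem.Set.ofList s) := by
    rw [List.perm_ext_iff_of_nodup (PySem.Set.nodup_ofList t) (PySem.Set.nodup_ofList s)]
    intro a
    rw [PySem.Set.mem_ofList, PySem.Set.mem_ofList]
    exact ⟨fun h => hperm.mem_iff.mp h, fun h => hperm.mem_iff.mpr h⟩
  have hcounteq : ∀ c : Char, t.count c = s.count c := fun c => hperm.count_eq c
  rw [show (fun c : Char => decide (((t.count c : Nat) : Int) = (list.length : Int)))
      = (fun c : Char => decide (((s.count c : Nat) : Int) = (list.length : Int))) from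
    funext (fun c => by rw [hcounteq c])]
  rw [hsetperm.countP_eq]
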